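-- pv_equiv track=rewrite | github.com/inuit57/Algorithm | 프로그래머스/LV2/기능개발.py | solution
-- ===== SOURCE A (Python) =====
-- def solution(progresses, speeds):
--     answer = []
--     cnt = 0
--     while(progresses != []):
--         for i, v in enumerate(progresses):
--             progresses[i] += speeds[i]
--
--         while(True):
--             if (progresses == []) or (progresses[0] < 100) :
--                 if cnt > 0 :
--                     answer.append(cnt)
--                     cnt = 0
--                 break;
--             else:
--                 cnt += 1;
--                 del progresses[0]
--                 del speeds[0]
--
--     return answer
-- ===== SOURCE B (Python) =====
-- def solution(progresses, speeds):
--     # finish day per task (ceil division), then group consecutive tasks by running max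
--     days = [max(1, -(-(100 - p) // s)) for p, s in zip(progresses, speeds)]
--     answer = []
--     cur_max = 0
--     cnt = 0
--     for d in days:
--         if d > cur_max:
--             if cnt:
--                 answer.append(cnt)
--             cur_max = d
--             cnt = 1
--         else:
--             cnt += 1
--     if cnt:
--         answer.append(cnt)
--     return answer
-- ===== Notes on version B (the rewrite author's own statement) =====
-- stated objective: faster
-- what changed: B replaces A's day-by-day simulation (repeatedly incrementing every remaining task and popping finished fronts) with a closed-form finish day per task via ceiling division plus one running-max pass; intended as faster (O(n) vs O(n*days)) - a timing run saw A time out at n=16 where B returned, so no ratio could be measured at the largest common size.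
-- outside the precondition, e.g. on solution([-10, 105], [55, -1]): A returns [2], B returns [1, 1]
import Mathlib
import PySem

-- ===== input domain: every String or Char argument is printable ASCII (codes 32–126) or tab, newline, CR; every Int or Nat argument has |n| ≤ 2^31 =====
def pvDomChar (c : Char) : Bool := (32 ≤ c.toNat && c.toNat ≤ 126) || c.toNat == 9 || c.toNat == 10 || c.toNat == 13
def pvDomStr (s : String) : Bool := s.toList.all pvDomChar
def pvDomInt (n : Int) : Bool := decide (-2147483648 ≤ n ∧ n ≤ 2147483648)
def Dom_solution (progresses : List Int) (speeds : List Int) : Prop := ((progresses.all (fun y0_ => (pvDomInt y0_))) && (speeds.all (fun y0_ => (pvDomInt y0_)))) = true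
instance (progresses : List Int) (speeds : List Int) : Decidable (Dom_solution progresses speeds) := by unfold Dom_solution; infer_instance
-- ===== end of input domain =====

-- B replaces A's day-by-day simulation with closed-form finish days (ceiling division) and one
-- running-max grouping pass; equivalence is about the RETURN value only (A empties its two
-- argument lists in place, B does not mutate them).

-- ===== PORT A =====
-- A's inner `while True` loop: pops the front while it is ≥ 100, counting; `del speeds[0]` = tail
def innerLoop : List Int → List Int → Int → (List Int × List Int × Int)
  | [], sp, cnt => ([], sp, cnt)
  | p :: ps, sp, cnt =>
      if p < 100 then (p :: ps, sp, cnt)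
      else innerLoop ps sp.tail (cnt + 1)

-- A's outer `while progresses != []` loop, with fuel (sufficient on Pre_, see fuel_sufficient)
def outerLoop : Nat → List Int → List Int → List Int → Int → List Int
  | 0, _, _, ans, _ => ans
  | fuel+1, prog, sp, ans, cnt =>
      if prog = [] then ans
      else
        -- for i, v in enumerate(progresses): progresses[i] += speeds[i]
        let r := innerLoop (List.zipWith (· + ·) prog sp) sp cnt
        if 0 < r.2.2 then outerLoop fuel r.1 r.2.1 (ans ++ [r.2.2]) 0
        else outerLoop fuel r.1 r.2.1 ans r.2.2

def solution (progresses : List Int) (speeds : List Int) : List Int :=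
  let fuel := progresses.foldl (fun a p => a + ((100 - p).toNat + 1)) 1
  outerLoop fuel progresses speeds [] 0

-- ===== PORT B =====
-- finish day of one task: max(1, -(-(100 - p) // s))
def dayOf (p s : Int) : Int := max 1 (-(PySem.Int.floordiv (-(100 - p)) s))

-- the running-max grouping loop of Source B (`if cnt:` = cnt ≠ 0)
def groupLoop : List Int → List Int → Int → Int → List Int
  | [], ans, _, cnt => if cnt ≠ 0 then ans ++ [cnt] else ans
  | d :: ds, ans, curMax, cnt =>
      if d > curMax then
        groupLoop ds (if cnt ≠ 0 then ans ++ [cnt] else ans) d 1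
      else groupLoop ds ans curMax (cnt + 1)

def solution_alt (progresses : List Int) (speeds : List Int) : List Int :=
  let days := (progresses.zip speeds).map (fun q => dayOf q.1 q.2)
  groupLoop days [] 0 0

-- ===== PRECONDITION & SPEC =====
-- Pre_ excludes (a) speeds shorter than progresses, where A raises IndexError, and (b) a
-- nonpositive speed among the used prefix, where A in general loops forever (on the few such
-- inputs where an initially overshot task lets A return, B's closed-form finish day need not
-- match A's blocked simulation).
def Pre_solution (progresses : List Int) (speeds : List Int) : Prop :=
  progresses.length ≤ speeds.length ∧ ∀ s ∈ speeds.take progresses.length, 0 < s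
instance (progresses : List Int) (speeds : List Int) : Decidable (Pre_solution progresses speeds) := by unfold Pre_solution; infer_instance

def pvWitness_solution : List Int × List Int := ([30, 95, 5], [30, 5, 100])

def Spec_solution (progresses : List Int) (speeds : List Int) (out : List Int) : Prop := out = solution_alt progresses speeds
instance (progresses : List Int) (speeds : List Int) (out : List Int) : Decidable (Spec_solution progresses speeds out) := by unfold Spec_solution; infer_instance

-- ===== CLAIM (what is proved, stated in full; the proofs are below) =====
def Claim_equal_solution : Prop := ∀ (progresses : List Int) (speeds : List Int), Dom_solution progresses speeds → Pre_solution progresses speeds → Spec_solution progresses speeds (solution progresses speeds)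

-- ===== LEMMAS AND PROOFS =====

-- proof-side abbreviations: `dec` is one day passing, `days` the list of finish days, `S` the measure
def dec (d : Int) : Int := max 1 (d - 1)

def days (prog sp : List Int) : List Int := (prog.zip sp).map (fun q => dayOf q.1 q.2)

def S (ds : List Int) : Nat := (ds.map Int.toNat).sum

lemma innerLoop_spec (prog : List Int) : ∀ (sp : List Int) (cnt : Int),
    innerLoop prog sp cnt =
      (prog.dropWhile (fun p => decide (100 ≤ p)),
       sp.drop (prog.takeWhile (fun p => decide (100 ≤ p))).length,
       cnt + (prog.takeWhile (fun p => decide (100 ≤ p))).length) := by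
  induction prog with
  | nil => intro sp cnt; simp [innerLoop]
  | cons p ps ih =>
    intro sp cnt
    by_cases hp : p < 100
    · have : ¬ (100 ≤ p) := by omega
      simp [innerLoop, hp, this]
    · have h100 : (100:Int) ≤ p := by omega
      simp only [innerLoop, if_neg hp, ih, List.takeWhile_cons, List.dropWhile_cons,
        decide_eq_true h100, if_pos trivial, Prod.mk.injEq]
      refine ⟨trivial, ?_, ?_⟩
      · simp [← List.drop_one, List.drop_drop, Nat.add_comm]
      · simp; omega

lemma zip_drop : ∀ (k : Nat) (l m : List Int), (l.drop k).zip (m.drop k) = (l.zip m).drop k := by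
  intro k
  induction k with
  | zero => simp
  | succ k ih =>
    intro l m
    cases l with
    | nil => simp
    | cons a l =>
      cases m with
      | nil => simp
      | cons b m => simp [ih]

lemma days_drop (prog sp : List Int) (k : Nat) :
    days (prog.drop k) (sp.drop k) = (days prog sp).drop k := by
  simp [days, zip_drop, List.map_drop]

lemma dayOf_eq_one_iff (p s : Int) (hs : 0 < s) : dayOf p s = 1 ↔ 100 ≤ p + s := by
  unfold dayOf
  have h := PySem.Int.le_floordiv_iff_mul_le (a := -(100 - p)) (b := s) (q := -1) hs
  constructor
  · intro hmax
    have h1 : -1 ≤ PySem.Int.floordiv (-(100 - p)) s := by omega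
    have := h.mp h1
    nlinarith
  · intro hle
    have h1 : (-1) * s ≤ -(100 - p) := by nlinarith
    have := h.mpr h1
    omega

lemma dayOf_add (p s : Int) (hs : 0 < s) : dayOf (p + s) s = dec (dayOf p s) := by
  unfold dayOf dec
  have h1 : PySem.Int.floordiv (-(100 - (p + s))) s = PySem.Int.floordiv (-(100 - p)) s + 1 := by
    rw [PySem.Int.floordiv_eq_ediv_of_pos (b:=s) (a:=-(100 - (p + s))) hs,
        PySem.Int.floordiv_eq_ediv_of_pos (b:=s) (a:=-(100 - p)) hs]
    have h2 := Int.add_mul_ediv_right (-(100 - p)) 1 (by omega : s ≠ 0)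
    have he : -(100 - (p + s)) = -(100 - p) + 1 * s := by ring
    rw [he, h2]
  rw [h1]; omega

lemma days_zipWith (prog : List Int) : ∀ sp : List Int,
    (∀ s ∈ sp.take prog.length, 0 < s) →
    days (List.zipWith (· + ·) prog sp) sp = (days prog sp).map dec := by
  induction prog with
  | nil => intro sp _; simp [days]
  | cons p ps ih =>
    intro sp hpos
    cases sp with
    | nil => simp [days]
    | cons s ss =>
      have hs : 0 < s := hpos s (by simp)
      have hrest : ∀ x ∈ ss.take ps.length, 0 < x := by
        intro x hx; exact hpos x (by simp [List.take_cons]; right; exact hx)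
      simp only [List.zipWith_cons_cons, days, List.zip_cons_cons, List.map_cons]
      rw [List.cons.injEq]
      exact ⟨dayOf_add p s hs, by simpa [days] using ih ss hrest⟩

lemma takeWhile_len_eq (prog : List Int) : ∀ sp : List Int,
    (∀ s ∈ sp.take prog.length, 0 < s) →
    ((List.zipWith (· + ·) prog sp).takeWhile (fun p => decide (100 ≤ p))).length
      = ((days prog sp).takeWhile (fun d => decide (d = 1))).length := by
  induction prog with
  | nil => intro sp _; simp [days]
  | cons p ps ih =>
    intro sp hpos
    cases sp with
    | nil => simp [days]
    | cons s ss =>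
      have hs : 0 < s := hpos s (by simp)
      have hrest : ∀ x ∈ ss.take ps.length, 0 < x := by
        intro x hx; exact hpos x (by simp [List.take_cons]; right; exact hx)
      have hiff := dayOf_eq_one_iff p s hs
      simp only [List.zipWith_cons_cons, days, List.zip_cons_cons, List.map_cons,
        List.takeWhile_cons]
      by_cases hge : 100 ≤ p + s
      · have hd : dayOf p s = 1 := hiff.mpr hge
        simp [hge, hd, ih ss hrest, days]
      · have hd : ¬ (dayOf p s = 1) := fun h => hge (hiff.mp h)
        simp [hge, hd]

lemma group_dec (ds : List Int) : ∀ ans cnt (m : Int), (∀ d ∈ ds, 1 ≤ d) → 2 ≤ m →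
    groupLoop (ds.map dec) ans (m - 1) cnt = groupLoop ds ans m cnt := by
  induction ds with
  | nil => intro ans cnt m _ _; simp [groupLoop]
  | cons d ds ih =>
    intro ans cnt m h1 hm
    have hd : 1 ≤ d := h1 d (by simp)
    have hrest : ∀ x ∈ ds, 1 ≤ x := fun x hx => h1 x (by simp [hx])
    simp only [List.map_cons, groupLoop]
    by_cases hgt : d > m
    · have hdec : dec d > m - 1 := by unfold dec; omega
      rw [if_pos hdec, if_pos hgt]
      have : dec d = d - 1 := by unfold dec; omega
      rw [this]
      exact ih _ 1 d hrest (by omega)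
    · have hdec : ¬ (dec d > m - 1) := by unfold dec; omega
      rw [if_neg hdec, if_neg hgt]
      exact ih ans (cnt + 1) m hrest hm

lemma group_dec_start (ds : List Int) (ans : List Int)
    (h1 : ∀ d ∈ ds, 1 ≤ d) (h2 : ds = [] ∨ 2 ≤ ds.head!) :
    groupLoop (ds.map dec) ans 0 0 = groupLoop ds ans 0 0 := by
  cases ds with
  | nil => simp
  | cons d ds =>
    have hd2 : 2 ≤ d := by
      rcases h2 with h | h
      · exact absurd h (by simp)
      · simpa using h
    have hrest : ∀ x ∈ ds, 1 ≤ x := fun x hx => h1 x (by simp [hx])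
    simp only [List.map_cons, groupLoop]
    have hdec : dec d > 0 := by unfold dec; omega
    rw [if_pos hdec, if_pos (by omega : d > 0)]
    have : dec d = d - 1 := by unfold dec; omega
    rw [this]
    exact group_dec ds ans 1 d hrest hd2

lemma group_ones (j : Nat) : ∀ rest ans (c : Int), 0 < c →
    (rest = [] ∨ 2 ≤ rest.head!) →
    groupLoop (List.replicate j 1 ++ rest) ans 1 c = groupLoop rest (ans ++ [c + j]) 0 0 := by
  induction j with
  | zero =>
    intro rest ans c hc h2
    cases rest with
    | nil => simp [groupLoop, show c ≠ 0 by omega]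
    | cons r rs =>
      have hr : 2 ≤ r := by
        rcases h2 with h | h
        · exact absurd h (by simp)
        · simpa using h
      simp only [List.replicate, List.nil_append, groupLoop]
      rw [if_pos (by omega : r > 1), if_pos (by omega : r > 0)]
      rw [if_pos (by omega : c ≠ 0), if_neg (by simp)]
      simp
  | succ j ih =>
    intro rest ans c hc h2
    have : List.replicate (j+1) (1:Int) ++ rest = 1 :: (List.replicate j 1 ++ rest) := by
      simp [List.replicate_succ]
    rw [this]
    simp only [groupLoop]
    rw [if_neg (by omega : ¬ ((1:Int) > 1))]
    have := ih rest ans (c + 1) (by omega) h2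
    rw [this]
    congr 2
    push_cast; ring

lemma S_cons (d : Int) (l : List Int) : S (d :: l) = d.toNat + S l := by simp [S]

lemma S_append (a b : List Int) : S (a ++ b) = S a + S b := by simp [S]

lemma S_replicate_one (k : Nat) : S (List.replicate k 1) = k := by simp [S]

lemma S_map_dec_le (l : List Int) (h : ∀ d ∈ l, 1 ≤ d) : S (l.map dec) ≤ S l := by
  induction l with
  | nil => simp
  | cons d rest ih =>
    have hd := h d (by simp)
    have h1 : (dec d).toNat ≤ d.toNat := by unfold dec; omega
    have h2 := ih (fun x hx => h x (by simp [hx]))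
    simp only [List.map_cons, S_cons]
    omega

lemma days_pos (prog sp : List Int) : ∀ d ∈ days prog sp, 1 ≤ d := by
  intro d hd
  simp [days] at hd
  obtain ⟨p, s, _, rfl⟩ := hd
  exact le_max_left _ _

lemma dropWhile_eq_drop (l : List Int) (p : Int → Bool) :
    l.dropWhile p = l.drop (l.takeWhile p).length := by
  induction l with
  | nil => simp
  | cons a l ih => by_cases h : p a <;> simp [List.dropWhile_cons, List.takeWhile_cons, h, ih]

lemma takeWhile_length_le (l : List Int) (p : Int → Bool) : (l.takeWhile p).length ≤ l.length := by
  induction l with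
  | nil => simp
  | cons a l ih => by_cases h : p a <;> simp [h] <;> omega

lemma dropWhile_head_false (l : List Int) (p : Int → Bool) (d : Int) (rest : List Int)
    (h : l.dropWhile p = d :: rest) : p d = false := by
  induction l with
  | nil => simp at h
  | cons a l ih =>
    rw [List.dropWhile_cons] at h
    by_cases hpa : p a
    · rw [if_pos hpa] at h; exact ih h
    · rw [if_neg hpa] at h
      cases h
      simpa using hpa

lemma outer_eq : ∀ (fuel : Nat) (prog sp ans : List Int),
    prog.length ≤ sp.length →
    (∀ s ∈ sp.take prog.length, 0 < s) →
    S (days prog sp) < fuel →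
    outerLoop fuel prog sp ans 0 = groupLoop (days prog sp) ans 0 0 := by
  intro fuel
  induction fuel with
  | zero => intro _ _ _ _ _ h; omega
  | succ fuel ih =>
    intro prog sp ans hlen hpos hS
    by_cases hnil : prog = []
    · subst hnil; simp [outerLoop, days, groupLoop]
    · have hproglen : 0 < prog.length := List.length_pos_of_ne_nil hnil
      set prog' := List.zipWith (· + ·) prog sp with hprog'
      set ds := days prog sp with hdsdef
      have hlen' : prog'.length = prog.length := by
        simp [hprog', List.length_zipWith]; omega
      have hdslen : ds.length = prog.length := by
        simp [hdsdef, days, List.length_zip]; omega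
      have hdpos : ∀ d ∈ ds, 1 ≤ d := days_pos prog sp
      -- the ds-side takeWhile prefix
      set pred := (fun d : Int => decide (d = 1)) with hpreddef
      set kd := (ds.takeWhile pred).length with hkddef
      have hk : (prog'.takeWhile (fun p => decide (100 ≤ p))).length = kd :=
        takeWhile_len_eq prog sp hpos
      have htake : ds.takeWhile pred = List.replicate kd 1 := by
        rw [hkddef]
        rw [List.eq_replicate_length]
        intro b hb
        have := List.mem_takeWhile_imp hb
        simpa [hpreddef] using this
      have hsplit : List.replicate kd 1 ++ ds.drop kd = ds := by
        conv_rhs => rw [← List.takeWhile_append_dropWhile (p := pred) (l := ds)]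
        rw [htake, dropWhile_eq_drop, ← hkddef]
      have hdw : ds.dropWhile pred = ds.drop kd := by rw [dropWhile_eq_drop, ← hkddef]
      have hd2 : ds.drop kd = [] ∨ 2 ≤ (ds.drop kd).head! := by
        rcases h : ds.drop kd with _ | ⟨d, rest⟩
        · exact Or.inl rfl
        · right
          have hdwcons : ds.dropWhile pred = d :: rest := by rw [hdw, h]
          have hfalse := dropWhile_head_false ds pred d rest hdwcons
          have hdmem : d ∈ ds := List.mem_of_mem_drop (h ▸ List.mem_cons_self)
          have hd1 : 1 ≤ d := hdpos d hdmem
          simp [hpreddef] at hfalse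
          simp
          omega
      have hkdle : kd ≤ ds.length := by rw [hkddef]; exact takeWhile_length_le ds pred
      -- days of the new state
      have hdays' : days prog' sp = ds.map dec := days_zipWith prog sp hpos
      have hdaysnew : days (prog'.drop kd) (sp.drop kd) = (ds.drop kd).map dec := by
        rw [days_drop, hdays', List.map_drop]
      -- new preconditions
      have hlen2 : (prog'.drop kd).length ≤ (sp.drop kd).length := by
        simp [List.length_drop, hlen']; omega
      have hpos2 : ∀ s ∈ (sp.drop kd).take (prog'.drop kd).length, 0 < s := by
        intro x hx
        apply hpos x
        have hxlen : (prog'.drop kd).length = prog.length - kd := by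
          simp [List.length_drop, hlen']
        rw [hxlen, List.take_drop] at hx
        have hx2 : x ∈ sp.take (kd + (prog.length - kd)) := List.mem_of_mem_drop hx
        have : kd + (prog.length - kd) = prog.length := by
          rw [hdslen] at hkdle; omega
        rwa [this] at hx2
      -- unfold one step of outerLoop
      rw [outerLoop]
      rw [if_neg hnil]
      simp only [innerLoop_spec, ← hprog', hk, dropWhile_eq_drop (prog') _, hk]
      by_cases hkd0 : kd = 0
      · -- nothing removed this round
        rw [hkd0] at hd2 ⊢
        simp only [List.drop_zero, Nat.cast_zero, add_zero]
        rw [if_neg (by omega : ¬ (0:Int) < 0)]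
        have hhead2 : ds = [] ∨ 2 ≤ ds.head! := by simpa using hd2
        have hdsne : ds ≠ [] := by
          intro h; rw [h] at hdslen; simp at hdslen; omega
        have hSlt : S (ds.map dec) < S ds := by
          rcases ds with _ | ⟨d, rest⟩
          · exact absurd rfl hdsne
          · have hd2' : 2 ≤ d := by simpa using hhead2
            have hrest : ∀ x ∈ rest, 1 ≤ x := fun x hx => hdpos x (by simp [hx])
            have := S_map_dec_le rest hrest
            simp only [List.map_cons, S_cons]
            have : (dec d).toNat < d.toNat := by unfold dec; omega
            omega
        have := ih prog' sp ans (by omega) (by rw [hlen']; exact hpos)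
          (by rw [hdays']; omega)
        rw [this, hdays']
        exact group_dec_start ds ans hdpos hhead2
      · -- kd elements finished this round
        have hkd1 : 1 ≤ kd := by omega
        rw [if_pos (by push_cast; omega : (0:Int) < 0 + (kd:Int))]
        have hSsplit : S ds = kd + S (ds.drop kd) := by
          conv_lhs => rw [← hsplit]
          rw [S_append, S_replicate_one]
        have hrestpos : ∀ d ∈ ds.drop kd, 1 ≤ d := fun d hd => hdpos d (List.mem_of_mem_drop hd)
        have hSlt : S ((ds.drop kd).map dec) < fuel := by
          have := S_map_dec_le (ds.drop kd) hrestpos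
          omega
        have := ih (prog'.drop kd) (sp.drop kd) (ans ++ [0 + (kd:Int)]) hlen2 hpos2
          (by rw [hdaysnew]; omega)
        rw [this, hdaysnew]
        rw [group_dec_start (ds.drop kd) _ hrestpos hd2]
        -- now evaluate the RHS groupLoop on ds = replicate kd 1 ++ drop
        conv_rhs => rw [← hsplit]
        rcases Nat.exists_eq_add_of_le hkd1 with ⟨j, hj⟩
        rw [hj]
        have hrepl : List.replicate (1 + j) (1:Int) = 1 :: List.replicate j 1 := by
          rw [Nat.add_comm, List.replicate_succ]
        rw [hrepl]
        simp only [List.cons_append, groupLoop]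
        rw [if_pos (by omega : (1:Int) > 0), if_neg (by simp)]
        rw [group_ones j (ds.drop (1 + j)) ans 1 (by omega) (by rw [← hj]; exact hd2)]
        congr 2
        push_cast; ring

lemma dayOf_le (p s : Int) (hs : 0 < s) : (dayOf p s).toNat ≤ (100 - p).toNat + 1 := by
  unfold dayOf
  by_cases ha : 1 ≤ 100 - p
  · have h := PySem.Int.le_floordiv_iff_mul_le (a := -(100 - p)) (b := s) (q := -(100 - p)) hs
    have h1 : -(100 - p) * s ≤ -(100 - p) := by nlinarith
    have := h.mpr h1
    omega
  · have h := PySem.Int.le_floordiv_iff_mul_le (a := -(100 - p)) (b := s) (q := 0) hs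
    have h1 : (0:Int) * s ≤ -(100 - p) := by nlinarith
    have := h.mpr h1
    omega

lemma fuel_aux : ∀ (prog : List Int) (sp : List Int) (acc : Nat), prog.length ≤ sp.length →
    (∀ s ∈ sp.take prog.length, 0 < s) →
    S (days prog sp) + acc ≤ prog.foldl (fun a p => a + ((100 - p).toNat + 1)) acc := by
  intro prog
  induction prog with
  | nil => intro sp acc _ _; simp [days, S]
  | cons p ps ih =>
    intro sp acc hlen hpos
    cases sp with
    | nil => simp at hlen
    | cons s ss =>
      have hs : 0 < s := hpos s (by simp)
      have hrest : ∀ x ∈ ss.take ps.length, 0 < x := by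
        intro x hx; exact hpos x (by simp [List.take_cons]; right; exact hx)
      have hday := dayOf_le p s hs
      have := ih ss (acc + ((100 - p).toNat + 1)) (by simpa using hlen) hrest
      simp only [days, List.zip_cons_cons, List.map_cons, S_cons, List.foldl_cons]
      simp only [days] at this
      omega

lemma fuel_sufficient (prog sp : List Int)
    (hlen : prog.length ≤ sp.length) (hpos : ∀ s ∈ sp.take prog.length, 0 < s) :
    S (days prog sp) < prog.foldl (fun a p => a + ((100 - p).toNat + 1)) 1 := by
  have := fuel_aux prog sp 1 hlen hpos
  omega

-- ===== VERDICT (by name: the statement is the Claim_ definition above) =====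
theorem solution_spec : Claim_equal_solution := by
  intro prog sp _ hpre
  unfold Spec_solution solution solution_alt
  show outerLoop _ prog sp [] 0 = groupLoop (days prog sp) [] 0 0
  exact outer_eq _ prog sp [] hpre.1 hpre.2 (fuel_sufficient prog sp hpre.1 hpre.2)
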